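-- pv_equiv track=rewrite | github.com/alberto-santini/covid-optimisation | swab-tests-data/italy-case-study/instance-generator.py | get_fac_served_labs
-- ===== SOURCE A (Python) =====
-- def get_fac_served_labs(lcf):
--     """ Inverse of get_lab_closest_factory. For each factory,
--         gives the list of labs which have it as their closest.
--     """
--
--     nfac = max(lcf) + 1
--     d = [list() for _ in range(nfac)]
--
--     for facidx in range(nfac):
--         for labidx, labfac in enumerate(lcf):
--             if labfac == facidx:
--                 d[facidx].append(labidx)
--
--     return d
-- ===== SOURCE B (Python) =====
-- def get_fac_served_labs(lcf):
--     """ Inverse of get_lab_closest_factory. For each factory,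
--         gives the list of labs which have it as their closest.
--     """
--     by_fac = {}
--     for labidx, fac in enumerate(lcf):
--         by_fac.setdefault(fac, []).append(labidx)
--     return [by_fac.get(fac, []) for fac in range(max(lcf) + 1)]
-- ===== Notes on version B (the rewrite author's own statement) =====
-- stated objective: faster
-- what changed: Replaced the nested per-factory rescan of all labs by a single grouping pass that collects lab indices into a dict keyed by factory, then materialises the buckets with one range lookup.
import Mathlib
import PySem

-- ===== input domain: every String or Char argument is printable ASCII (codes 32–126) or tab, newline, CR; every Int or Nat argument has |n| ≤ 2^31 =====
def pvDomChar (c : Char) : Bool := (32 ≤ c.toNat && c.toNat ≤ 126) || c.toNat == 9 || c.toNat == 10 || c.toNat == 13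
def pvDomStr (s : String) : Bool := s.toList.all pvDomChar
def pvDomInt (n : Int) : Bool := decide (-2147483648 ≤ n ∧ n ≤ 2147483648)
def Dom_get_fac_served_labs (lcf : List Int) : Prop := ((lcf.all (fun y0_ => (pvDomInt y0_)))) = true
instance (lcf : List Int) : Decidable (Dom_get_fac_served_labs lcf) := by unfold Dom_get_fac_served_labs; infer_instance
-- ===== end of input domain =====

-- B replaces A's nested factory-by-factory rescan with a single dict-grouping pass plus a range lookup (alternative decomposition; equal wherever A returns).


-- ===== PORT A =====
-- d[i].append(x) on A's bucket list (index always in range where A uses it)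
def pyBucketAppend (d : List (List Int)) (i : Nat) (x : Int) : List (List Int) :=
  d.set i ((d.getD i []) ++ [x])

def get_fac_served_labs (lcf : List Int) : List (List Int) :=
  match PySem.List.max? lcf (fun x => x) with
  | none => []  -- Python raises ValueError here (empty lcf, excluded by Pre_)
  | some m =>
    let nfac := m + 1
    let d0 := (PySem.List.pyRange 0 nfac 1).map (fun _ => ([] : List Int))
    (PySem.List.pyRange 0 nfac 1).foldl (fun d facidx =>
      (PySem.List.enumerate lcf).foldl (fun d p =>
        if p.2 = facidx then pyBucketAppend d facidx.toNat p.1 else d) d) d0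

-- ===== PORT B =====
-- by_fac.setdefault(fac, []).append(labidx) is, value-wise, d[fac] = d.get(fac, []) + [labidx] = Dict.modify
def get_fac_served_labs_alt (lcf : List Int) : List (List Int) :=
  let by_fac : PySem.Dict Int (List Int) :=
    (PySem.List.enumerate lcf).foldl
      (fun d p => d.modify p.2 [] (fun l => l ++ [p.1])) PySem.Dict.empty
  match PySem.List.max? lcf (fun x => x) with
  | none => []  -- Python raises ValueError here (empty lcf, excluded by Pre_)
  | some m => (PySem.List.pyRange 0 (m + 1) 1).map (fun fac => by_fac.getD fac [])

-- ===== PRECONDITION & SPEC =====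
-- Pre_ excludes exactly the empty list, on which both Pythons raise ValueError (max of an empty sequence).
def Pre_get_fac_served_labs (lcf : List Int) : Prop := lcf ≠ []
instance (lcf : List Int) : Decidable (Pre_get_fac_served_labs lcf) := by unfold Pre_get_fac_served_labs; infer_instance

def pvWitness_get_fac_served_labs : List Int := [0, 2, 1, 0]

def Spec_get_fac_served_labs (lcf : List Int) (out : List (List Int)) : Prop := out = get_fac_served_labs_alt lcf
instance (lcf : List Int) (out : List (List Int)) : Decidable (Spec_get_fac_served_labs lcf out) := by unfold Spec_get_fac_served_labs; infer_instance

-- ===== CLAIM =====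
def Claim_equal_get_fac_served_labs : Prop := ∀ (lcf : List Int), Dom_get_fac_served_labs lcf → Pre_get_fac_served_labs lcf → Spec_get_fac_served_labs lcf (get_fac_served_labs lcf)

-- ===== LEMMAS AND PROOFS =====

-- a whole batch of A-style appends, bucket-index/value pairs
def pvBulk (ps : List (Nat × Int)) (d : List (List Int)) : List (List Int) :=
  ps.foldl (fun d p => pyBucketAppend d p.1 p.2) d

theorem pvBulk_length (ps : List (Nat × Int)) (d : List (List Int)) :
    (pvBulk ps d).length = d.length := by
  induction ps generalizing d with
  | nil => rfl
  | cons p ps ih => simp [pvBulk, List.foldl_cons] at *; rw [ih]; simp [pyBucketAppend]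

theorem pyBucketAppend_getD (d : List (List Int)) (i : Nat) (x : Int) (j : Nat)
    (hi : i < d.length) :
    (pyBucketAppend d i x).getD j [] =
      if i = j then d.getD j [] ++ [x] else d.getD j [] := by
  by_cases h : i = j
  · subst h; simp [pyBucketAppend, List.getD_eq_getElem?_getD, hi]
  · simp [pyBucketAppend, List.getD_eq_getElem?_getD, List.getElem?_set_ne h]
    exact h

theorem pvBulk_getD (ps : List (Nat × Int)) (d : List (List Int)) (j : Nat)
    (hps : ∀ p ∈ ps, p.1 < d.length) :
    (pvBulk ps d).getD j [] =
      d.getD j [] ++ ps.filterMap (fun p => if p.1 = j then some p.2 else none) := by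
  induction ps generalizing d with
  | nil => simp [pvBulk]
  | cons p ps ih =>
    have hp : p.1 < d.length := hps p (List.mem_cons_self)
    have hrec := ih (pyBucketAppend d p.1 p.2)
      (by intro q hq; simpa [pyBucketAppend] using hps q (List.mem_cons_of_mem _ hq))
    simp only [pvBulk, List.foldl_cons] at *
    rw [hrec, pyBucketAppend_getD d p.1 p.2 j hp]
    by_cases h : p.1 = j <;> simp [h]

theorem pvBulk_append (ps qs : List (Nat × Int)) (d : List (List Int)) :
    pvBulk (ps ++ qs) d = pvBulk qs (pvBulk ps d) := by
  simp [pvBulk, List.foldl_append]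

-- A's inner lab loop for one factory c is a batch of appends into bucket c
theorem innerA_eq_bulk (ps : List (Int × Int)) (c : Int) (d : List (List Int)) :
    ps.foldl (fun d p => if p.2 = c then pyBucketAppend d c.toNat p.1 else d) d =
      pvBulk (ps.filterMap (fun p => if p.2 = c then some (c.toNat, p.1) else none)) d := by
  induction ps generalizing d with
  | nil => rfl
  | cons p ps ih =>
    by_cases h : p.2 = c <;> simp [pvBulk, List.foldl_cons, h, ih]

-- A's whole double loop as one batch
theorem outerA_eq_bulk (facs : List Int) (lcf : List Int) (d : List (List Int)) :
    facs.foldl (fun d facidx =>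
        (PySem.List.enumerate lcf).foldl (fun d p =>
          if p.2 = facidx then pyBucketAppend d facidx.toNat p.1 else d) d) d =
      pvBulk (facs.flatMap (fun c =>
        (PySem.List.enumerate lcf).filterMap
          (fun p => if p.2 = c then some (c.toNat, p.1) else none))) d := by
  induction facs generalizing d with
  | nil => rfl
  | cons c facs ih =>
    simp only [List.foldl_cons, List.flatMap_cons, pvBulk_append]
    rw [innerA_eq_bulk, ih]

-- B's grouping dict, characterised bucket by bucket
theorem dictB_getD (lcf : List Int) (c : Int) :
    ((PySem.List.enumerate lcf).foldl
        (fun d p => d.modify p.2 [] (fun l => l ++ [p.1]))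
        (PySem.Dict.empty : PySem.Dict Int (List Int))).getD c [] =
      (PySem.List.enumerate lcf).filterMap (fun p => if p.2 = c then some p.1 else none) := by
  have hswap : (PySem.List.enumerate lcf).foldl
      (fun d p => d.modify p.2 [] (fun l => l ++ [p.1]))
      (PySem.Dict.empty : PySem.Dict Int (List Int)) =
      ((PySem.List.enumerate lcf).map Prod.swap).foldl
        (fun d q => d.modify q.1 [] (fun l => l ++ [q.2])) PySem.Dict.empty := by
    rw [List.foldl_map]
    simp [Prod.fst_swap, Prod.snd_swap]
  rw [hswap, PySem.Dict.getD_foldl_modify_append, PySem.Dict.getD_empty]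
  simp only [List.nil_append]
  induction PySem.List.enumerate lcf 0 with
  | nil => rfl
  | cons p ps ih =>
    by_cases h : p.2 = c <;> simp [Prod.swap, h, ih]

theorem get_fac_served_labs_spec : Claim_equal_get_fac_served_labs := by
  unfold Claim_equal_get_fac_served_labs
  intro lcf _ hne
  unfold Spec_get_fac_served_labs get_fac_served_labs get_fac_served_labs_alt
  obtain ⟨m, hm⟩ : ∃ m, PySem.List.max? lcf (fun x => x) = some m := by
    rcases h : PySem.List.max? lcf (fun x => x) with _ | m
    · exact absurd ((PySem.List.max?_eq_none_iff lcf (fun x => x)).mp h) hne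
    · exact ⟨m, rfl⟩
  rw [hm]
  simp only
  set d0 := (PySem.List.pyRange 0 (m + 1) 1).map (fun _ => ([] : List Int)) with hd0
  have hlen0 : d0.length = (m + 1).toNat := by
    simp [hd0, PySem.List.length_pyRange_one]
  have hd0j : ∀ j : Nat, d0.getD j [] = [] := by
    intro j
    rcases Nat.lt_or_ge j d0.length with h | h
    · rw [List.getD_eq_getElem _ _ h]; simp [hd0]
    · rw [List.getD_eq_default _ _ h]
  rw [outerA_eq_bulk]
  set psA := ((PySem.List.pyRange 0 (m + 1) 1).flatMap (fun c =>
        (PySem.List.enumerate lcf).filterMap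
          (fun p => if p.2 = c then some (c.toNat, p.1) else none))) with hpsA
  have hbndA : ∀ p ∈ psA, p.1 < d0.length := by
    intro p hp
    rw [hpsA] at hp
    obtain ⟨c, hc, hp⟩ := List.mem_flatMap.mp hp
    obtain ⟨q, _, hq⟩ := List.mem_filterMap.mp hp
    have hcb := PySem.List.mem_pyRange_one.mp hc
    split_ifs at hq with h
    cases hq; rw [hlen0]; omega
  apply List.ext_getElem
  · simp [pvBulk_length, hlen0, PySem.List.length_pyRange_one]
  · intro j hja hjb
    have hj : j < (m + 1).toNat := by rw [pvBulk_length, hlen0] at hja; exact hja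
    -- RHS: the j-th range entry is (j : Int), looked up in the dict
    rw [List.getElem_map, PySem.List.getElem_pyRange_one]
    simp only [zero_add]
    rw [dictB_getD]
    -- LHS: the j-th bucket of the bulk append
    rw [← List.getD_eq_getElem _ [] hja, pvBulk_getD psA d0 j hbndA, hd0j]
    simp only [List.nil_append]
    -- A's bucket j: split the factory range around c = j
    rw [hpsA, List.filterMap_flatMap]
    have hsplit : PySem.List.pyRange 0 (m + 1) 1 =
        PySem.List.pyRange 0 (j : Int) 1 ++ ((j : Int) :: PySem.List.pyRange ((j : Int) + 1) (m + 1) 1) := by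
      have hcons : PySem.List.pyRange ((j : Int)) (m + 1) 1 =
          (j : Int) :: PySem.List.pyRange ((j : Int) + 1) (m + 1) 1 :=
        PySem.List.pyRange_one_cons (by omega)
      rw [PySem.List.pyRange_one_append 0 (j : Int) (m + 1) (by omega) (by omega), hcons]
    rw [hsplit, List.flatMap_append, List.flatMap_cons]
    have hside : ∀ c : Int, 0 ≤ c → c ≠ (j : Int) →
        ((PySem.List.enumerate lcf).filterMap
          (fun p => if p.2 = c then some (c.toNat, p.1) else none)).filterMap
          (fun p => if p.1 = j then some p.2 else none) = [] := by
      intro c hc0 hcj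
      rw [List.filterMap_filterMap]
      apply List.filterMap_eq_nil_iff.mpr
      intro p _
      by_cases h : p.2 = c
      · have : c.toNat ≠ j := by omega
        simp [h, this]
      · simp [h]
    have hleft : (PySem.List.pyRange 0 (j : Int) 1).flatMap (fun c =>
        ((PySem.List.enumerate lcf).filterMap
          (fun p => if p.2 = c then some (c.toNat, p.1) else none)).filterMap
          (fun p => if p.1 = j then some p.2 else none)) = [] := by
      apply List.flatMap_eq_nil_iff.mpr
      intro c hc
      have := PySem.List.mem_pyRange_one.mp hc
      exact hside c (by omega) (by omega)
    have hright : (PySem.List.pyRange ((j : Int) + 1) (m + 1) 1).flatMap (fun c =>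
        ((PySem.List.enumerate lcf).filterMap
          (fun p => if p.2 = c then some (c.toNat, p.1) else none)).filterMap
          (fun p => if p.1 = j then some p.2 else none)) = [] := by
      apply List.flatMap_eq_nil_iff.mpr
      intro c hc
      have := PySem.List.mem_pyRange_one.mp hc
      exact hside c (by omega) (by omega)
    rw [hleft, hright, List.filterMap_filterMap]
    simp only [List.nil_append, List.append_nil]
    apply List.filterMap_congr
    intro p _
    by_cases h : p.2 = (j : Int)
    · simp [h, Int.toNat_natCast]
    · simp [h]
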